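-- pv_equiv track=rewrite | github.com/jabberwock/d4builder | data/build_db.py | class_from_skill_key
-- ===== SOURCE A (Python) =====
-- SKILL_PREFIX_CLASS = {
--     'Sorcerer':    'Sorcerer',
--     'Druid':       'Druid',
--     'Barbarian':   'Barbarian',
--     'Rogue':       'Rogue',
--     'Necromancer': 'Necromancer',
--     'Spiritborn':  'Spiritborn',
--     'Paladin':     'Paladin',
--     'Warlock':     'Warlock',
-- }
--
-- def class_from_skill_key(key):
--     """Derive class from skill key prefix like 'Sorcerer_Spark'."""
--     for prefix, cls in SKILL_PREFIX_CLASS.items():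
--         # Handle X1_ prefixed enchantments/variants
--         stripped = key
--         if key.startswith('X1_') or key.startswith('x1_'):
--             stripped = key[3:]
--         if stripped.startswith(prefix + '_') or stripped.startswith(prefix.lower() + '_'):
--             return cls
--     return 'Generic'
-- ===== SOURCE B (Python) =====
-- _CLASS_NAMES = ('Sorcerer', 'Druid', 'Barbarian', 'Rogue',
--                 'Necromancer', 'Spiritborn', 'Paladin', 'Warlock')
--
-- _CLASS_LOOKUP = {}
-- for _c in _CLASS_NAMES:
--     _CLASS_LOOKUP[_c] = _c
--     _CLASS_LOOKUP[_c.lower()] = _c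
--
--
-- def class_from_skill_key(key):
--     """Derive class from skill key prefix like 'Sorcerer_Spark'."""
--     stripped = key[3:] if key.startswith(('X1_', 'x1_')) else key
--     head, sep, _rest = stripped.partition('_')
--     if not sep:
--         return 'Generic'
--     return _CLASS_LOOKUP.get(head, 'Generic')
-- ===== Notes on version B (the rewrite author's own statement) =====
-- stated objective: simpler
-- what changed: Replaced the 8-iteration loop that tests two string prefixes per class with a single partition of the (X1_-stripped) key at its first '_' followed by one lookup of the head segment in a dict built once from the class names and their lowercase forms.
import Mathlib
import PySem

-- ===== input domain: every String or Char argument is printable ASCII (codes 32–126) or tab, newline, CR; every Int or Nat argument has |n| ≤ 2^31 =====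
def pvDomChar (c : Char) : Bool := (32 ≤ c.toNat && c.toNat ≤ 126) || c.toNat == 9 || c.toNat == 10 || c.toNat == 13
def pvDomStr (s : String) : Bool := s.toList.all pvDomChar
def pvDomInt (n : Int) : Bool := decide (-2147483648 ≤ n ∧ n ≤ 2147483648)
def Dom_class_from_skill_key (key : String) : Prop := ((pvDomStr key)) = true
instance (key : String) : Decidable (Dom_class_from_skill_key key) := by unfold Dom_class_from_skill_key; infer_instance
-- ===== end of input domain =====

-- B replaces the 8-iteration prefix scan by one partition at the first '_' and a single
-- lookup of the head segment in a dict built once (objective: simpler).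

-- ===== PORT A =====
def skillPrefixClass : List (String × String) :=
  [("Sorcerer", "Sorcerer"), ("Druid", "Druid"), ("Barbarian", "Barbarian"), ("Rogue", "Rogue"),
   ("Necromancer", "Necromancer"), ("Spiritborn", "Spiritborn"), ("Paladin", "Paladin"), ("Warlock", "Warlock")]

def classLoopA (key : String) : List (String × String) → String
  | [] => "Generic"
  | (pfx, cls) :: rest =>
      let stripped :=
        if PySem.Str.startswith key "X1_" || PySem.Str.startswith key "x1_"
        then PySem.Str.slice key (some 3) none else key
      if PySem.Str.startswith stripped (pfx ++ "_")
         || PySem.Str.startswith stripped (PySem.Str.lower pfx ++ "_")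
      then cls else classLoopA key rest

def class_from_skill_key (key : String) : String := classLoopA key skillPrefixClass

-- ===== PORT B =====
def classNames : List String :=
  ["Sorcerer", "Druid", "Barbarian", "Rogue", "Necromancer", "Spiritborn", "Paladin", "Warlock"]

def classLookup : PySem.Dict String String :=
  classNames.foldl (fun d c => (d.insert c c).insert (PySem.Str.lower c) c) PySem.Dict.empty

-- str.partition('_') ported by hand on the char list (exact: head = the chars before the first
-- '_', and the separator part is non-empty iff '_' occurs in the string).
def class_from_skill_key_alt (key : String) : String :=
  let stripped :=
    if PySem.Str.startswith key "X1_" || PySem.Str.startswith key "x1_"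
    then PySem.Str.slice key (some 3) none else key
  let cs := stripped.toList
  let head := cs.takeWhile (fun c => c != '_')
  if cs.contains '_' then classLookup.getD (String.ofList head) "Generic" else "Generic"

-- ===== PRECONDITION & SPEC =====
def Spec_class_from_skill_key (key : String) (out : String) : Prop := out = class_from_skill_key_alt key
instance (key : String) (out : String) : Decidable (Spec_class_from_skill_key key out) := by unfold Spec_class_from_skill_key; infer_instance

-- ===== CLAIM (what is proved, stated in full; the proofs are below) =====
def Claim_equal_class_from_skill_key : Prop := ∀ (key : String), Dom_class_from_skill_key key → Spec_class_from_skill_key key (class_from_skill_key key)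

-- ===== LEMMAS AND PROOFS =====

-- "p_" is a prefix of s iff '_' occurs in s and the text before the first '_' is exactly p
theorem prefix_underscore_iff (p s : List Char) (hp : '_' ∉ p) :
    (p ++ ['_']) <+: s ↔ ('_' ∈ s ∧ s.takeWhile (fun c => c != '_') = p) := by
  induction p generalizing s with
  | nil =>
      cases s with
      | nil => simp
      | cons c t =>
          by_cases hc : c = '_'
          · simp [hc]
          · simp [hc, List.cons_prefix_cons, Ne.symm hc]
  | cons a p ih =>
      cases s with
      | nil => simp
      | cons c t =>
          have ha : a ≠ '_' := by simp at hp; tauto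
          have hp' : '_' ∉ p := by simp at hp; tauto
          by_cases hc : c = '_'
          · subst hc
            simp [List.cons_prefix_cons, ha]
          · simp [hc, List.cons_prefix_cons, ih t hp',
              eq_comm (a := c) (b := a)]
            tauto

theorem ofList_eq_iff (h : List Char) (s : String) : String.ofList h = s ↔ h = s.toList := by
  constructor
  · intro e; rw [← e, String.toList_ofList]
  · intro e; rw [e, String.ofList_toList]

-- one iteration's test, re-expressed through the head segment before the first '_'
theorem cond_iff (p q : String) (hp : '_' ∉ p.toList) (hq : '_' ∉ q.toList) (st : String) :
    (PySem.Str.startswith st (p ++ "_") || PySem.Str.startswith st (q ++ "_")) = true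
      ↔ '_' ∈ st.toList ∧
        (String.ofList (st.toList.takeWhile (fun c => c != '_')) = p ∨
         String.ofList (st.toList.takeWhile (fun c => c != '_')) = q) := by
  have hund : ("_" : String).toList = ['_'] := by decide
  simp only [Bool.or_eq_true, PySem.Str.startswith_eq, PySem.Chars.startswith_iff,
    String.toList_append, hund, prefix_underscore_iff p.toList st.toList hp,
    prefix_underscore_iff q.toList st.toList hq, ofList_eq_iff]
  tauto

-- generic fact: a scan testing "x = p ∨ x = q" per item equals the two-test lookup chain
def genA (x : String) : List (String × String × String) → String
  | [] => "Generic"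
  | (p, q, c) :: r => if x = p ∨ x = q then c else genA x r

def genB (x : String) : List (String × String × String) → String
  | [] => "Generic"
  | (p, q, c) :: r => if p == x then c else if q == x then c else genB x r

theorem genA_eq_genB (x : String) (L : List (String × String × String)) :
    genA x L = genB x L := by
  induction L with
  | nil => rfl
  | cons t r ih =>
      obtain ⟨p, q, c⟩ := t
      by_cases h1 : x = p
      · subst h1; simp [genA, genB]
      · have h1' : ¬ p = x := fun e => h1 e.symm
        by_cases h2 : x = q
        · subst h2; simp [genA, genB, h1, h1']
        · have h2' : ¬ q = x := fun e => h2 e.symm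
          simp [genA, genB, h1, h1', h2, h2', ih]

theorem getD_mk_cons (k x v : String) (rest : List (String × String)) (d0 : String) :
    (PySem.Dict.mk ((k, v) :: rest)).getD x d0
      = if k == x then v else (PySem.Dict.mk rest).getD x d0 := by
  cases hk : k == x <;>
    simp [PySem.Dict.getD_eq_get?_getD, PySem.Dict.get?_mk_cons, hk]

theorem getD_mk_nil (x d0 : String) : (PySem.Dict.mk ([] : List (String × String))).getD x d0 = d0 := by
  simp [PySem.Dict.getD_eq_get?_getD]
  rfl

set_option maxHeartbeats 1000000 in
theorem class_from_skill_key_spec : Claim_equal_class_from_skill_key := by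
  intro key _
  have hL : classLookup = PySem.Dict.mk
      [("Sorcerer", "Sorcerer"), ("sorcerer", "Sorcerer"), ("Druid", "Druid"), ("druid", "Druid"),
       ("Barbarian", "Barbarian"), ("barbarian", "Barbarian"), ("Rogue", "Rogue"), ("rogue", "Rogue"),
       ("Necromancer", "Necromancer"), ("necromancer", "Necromancer"),
       ("Spiritborn", "Spiritborn"), ("spiritborn", "Spiritborn"),
       ("Paladin", "Paladin"), ("paladin", "Paladin"),
       ("Warlock", "Warlock"), ("warlock", "Warlock")] := by rfl
  have l1 : PySem.Str.lower "Sorcerer" = "sorcerer" := by decide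
  have l2 : PySem.Str.lower "Druid" = "druid" := by decide
  have l3 : PySem.Str.lower "Barbarian" = "barbarian" := by decide
  have l4 : PySem.Str.lower "Rogue" = "rogue" := by decide
  have l5 : PySem.Str.lower "Necromancer" = "necromancer" := by decide
  have l6 : PySem.Str.lower "Spiritborn" = "spiritborn" := by decide
  have l7 : PySem.Str.lower "Paladin" = "paladin" := by decide
  have l8 : PySem.Str.lower "Warlock" = "warlock" := by decide
  unfold Spec_class_from_skill_key class_from_skill_key class_from_skill_key_alt
  simp only [classLoopA, skillPrefixClass]
  set st :=
    (if PySem.Str.startswith key "X1_" || PySem.Str.startswith key "x1_"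
     then PySem.Str.slice key (some 3) none else key) with hst
  simp only [l1, l2, l3, l4, l5, l6, l7, l8]
  simp only [cond_iff "Sorcerer" "sorcerer" (by decide) (by decide),
    cond_iff "Druid" "druid" (by decide) (by decide),
    cond_iff "Barbarian" "barbarian" (by decide) (by decide),
    cond_iff "Rogue" "rogue" (by decide) (by decide),
    cond_iff "Necromancer" "necromancer" (by decide) (by decide),
    cond_iff "Spiritborn" "spiritborn" (by decide) (by decide),
    cond_iff "Paladin" "paladin" (by decide) (by decide),
    cond_iff "Warlock" "warlock" (by decide) (by decide)]
  simp only [hL, getD_mk_cons, getD_mk_nil]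
  by_cases hu : '_' ∈ st.toList
  · have hc : st.toList.contains '_' = true := by
      simpa [List.contains_iff_mem] using hu
    simp only [hu, true_and, hc, if_true]
    exact genA_eq_genB (String.ofList (st.toList.takeWhile (fun c => c != '_')))
      [("Sorcerer", "sorcerer", "Sorcerer"), ("Druid", "druid", "Druid"),
       ("Barbarian", "barbarian", "Barbarian"), ("Rogue", "rogue", "Rogue"),
       ("Necromancer", "necromancer", "Necromancer"), ("Spiritborn", "spiritborn", "Spiritborn"),
       ("Paladin", "paladin", "Paladin"), ("Warlock", "warlock", "Warlock")]
  · simp [hu]
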